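-- pv_equiv track=rewrite | github.com/MrBrantCode/unitest_baseline | mut_generate/mist_train_cf/cf_32990/solution.py | categorize_finite_element_functions
-- ===== SOURCE A (Python) =====
-- def categorize_finite_element_functions(functions):
--     categorized_functions = {'H8': [], 'Q4': [], 'Q5': []}
--
--     for function in functions:
--         if function.startswith('H8'):
--             categorized_functions['H8'].append(function)
--         elif function.startswith('Q4'):
--             categorized_functions['Q4'].append(function)
--         elif function.startswith('Q5'):
--             categorized_functions['Q5'].append(function)
--
--     return categorized_functions
-- ===== SOURCE B (Python) =====
-- def categorize_finite_element_functions(functions):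
--     return {p: [f for f in functions if f.startswith(p)] for p in ('H8', 'Q4', 'Q5')}
-- ===== Notes on version B (the rewrite author's own statement) =====
-- stated objective: simpler
-- what changed: Replaces the single branching loop with three appends into a pre-built dict by a one-line dict comprehension doing one independent filter pass per prefix, relying on the prefixes being mutually exclusive.
import Mathlib
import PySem

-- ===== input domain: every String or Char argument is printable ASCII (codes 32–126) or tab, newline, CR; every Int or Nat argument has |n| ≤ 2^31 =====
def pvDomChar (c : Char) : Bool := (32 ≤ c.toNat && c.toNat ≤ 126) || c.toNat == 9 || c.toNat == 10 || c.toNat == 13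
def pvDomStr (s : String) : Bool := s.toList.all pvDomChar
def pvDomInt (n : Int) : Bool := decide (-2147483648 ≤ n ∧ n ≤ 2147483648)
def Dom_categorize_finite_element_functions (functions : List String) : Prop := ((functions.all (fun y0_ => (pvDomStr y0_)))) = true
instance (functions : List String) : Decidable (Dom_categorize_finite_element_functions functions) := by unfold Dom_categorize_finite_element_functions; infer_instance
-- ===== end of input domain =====

-- B replaces A's single branching loop with three independent filter passes (one per prefix); equal because the prefixes are mutually exclusive.

-- ===== PORT A =====
-- The dict has fixed keys 'H8','Q4','Q5', so it is the triple of its three lists; the loop appends per the if/elif chain.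
def categorize_finite_element_functions (functions : List String) : List (String × List String) :=
  let st := functions.foldl
    (fun (acc : List String × List String × List String) f =>
      if PySem.Str.startswith f "H8" then (acc.1 ++ [f], acc.2.1, acc.2.2)
      else if PySem.Str.startswith f "Q4" then (acc.1, acc.2.1 ++ [f], acc.2.2)
      else if PySem.Str.startswith f "Q5" then (acc.1, acc.2.1, acc.2.2 ++ [f])
      else acc)
    ([], [], [])
  [("H8", st.1), ("Q4", st.2.1), ("Q5", st.2.2)]

-- ===== PORT B =====
def categorize_finite_element_functions_alt (functions : List String) : List (String × List String) :=
  ["H8", "Q4", "Q5"].map (fun p => (p, functions.filter (fun f => PySem.Str.startswith f p)))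

-- ===== PRECONDITION & SPEC =====
def Spec_categorize_finite_element_functions (functions : List String) (out : List (String × List String)) : Prop := out = categorize_finite_element_functions_alt functions
instance (functions : List String) (out : List (String × List String)) : Decidable (Spec_categorize_finite_element_functions functions out) := by unfold Spec_categorize_finite_element_functions; infer_instance

-- ===== CLAIM (what is proved, stated in full; the proofs are below) =====
def Claim_equal_categorize_finite_element_functions : Prop := ∀ (functions : List String), Dom_categorize_finite_element_functions functions → Spec_categorize_finite_element_functions functions (categorize_finite_element_functions functions)

-- ===== LEMMAS AND PROOFS =====

-- mutual exclusivity of the prefixes: equal-length distinct strings cannot both be prefixes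
theorem pv_excl {s : String} {a b : String} (hne : a.toList ≠ b.toList)
    (hlen : a.toList.length = b.toList.length)
    (h : PySem.Str.startswith s a = true) : PySem.Str.startswith s b = false := by
  by_contra hb'
  rw [Bool.not_eq_false] at hb'
  simp only [PySem.Str.startswith_eq, PySem.Chars.startswith_iff] at h hb'
  exact hne ((List.prefix_of_prefix_length_le h hb' (le_of_eq hlen)).eq_of_length hlen)

theorem pv_fold_inv (xs : List String) (h q r : List String) :
    xs.foldl
      (fun (acc : List String × List String × List String) f =>
        if PySem.Str.startswith f "H8" then (acc.1 ++ [f], acc.2.1, acc.2.2)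
        else if PySem.Str.startswith f "Q4" then (acc.1, acc.2.1 ++ [f], acc.2.2)
        else if PySem.Str.startswith f "Q5" then (acc.1, acc.2.1, acc.2.2 ++ [f])
        else acc) (h, q, r)
    = (h ++ xs.filter (fun f => PySem.Str.startswith f "H8"),
       q ++ xs.filter (fun f => PySem.Str.startswith f "Q4"),
       r ++ xs.filter (fun f => PySem.Str.startswith f "Q5")) := by
  induction xs generalizing h q r with
  | nil => simp
  | cons x xs ih =>
    simp only [List.foldl_cons, List.filter_cons]
    by_cases h8 : PySem.Str.startswith x "H8" = true
    · have q4 : PySem.Str.startswith x "Q4" = false := pv_excl (by decide) (by decide) h8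
      have q5 : PySem.Str.startswith x "Q5" = false := pv_excl (by decide) (by decide) h8
      rw [if_pos h8, if_pos h8,
          if_neg (show ¬(PySem.Str.startswith x "Q4" = true) by rw [q4]; exact Bool.false_ne_true),
          if_neg (show ¬(PySem.Str.startswith x "Q5" = true) by rw [q5]; exact Bool.false_ne_true), ih]
      simp
    · by_cases q4 : PySem.Str.startswith x "Q4" = true
      · have q5 : PySem.Str.startswith x "Q5" = false := pv_excl (by decide) (by decide) q4
        rw [if_neg h8, if_neg h8, if_pos q4, if_pos q4,
            if_neg (show ¬(PySem.Str.startswith x "Q5" = true) by rw [q5]; exact Bool.false_ne_true), ih]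
        simp
      · by_cases q5 : PySem.Str.startswith x "Q5" = true
        · rw [if_neg h8, if_neg h8, if_neg q4, if_neg q4, if_pos q5, if_pos q5, ih]
          simp
        · rw [if_neg h8, if_neg h8, if_neg q4, if_neg q4, if_neg q5, if_neg q5, ih]

-- ===== VERDICT (by name: the statement is the Claim_ definition above) =====
theorem categorize_finite_element_functions_spec : Claim_equal_categorize_finite_element_functions := by
  intro functions _
  show _ = _
  unfold categorize_finite_element_functions categorize_finite_element_functions_alt
  rw [pv_fold_inv]
  simp
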